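-- pv_equiv track=rewrite | github.com/omni-us/api-consistency-checker | api-consistency-checker/testmodule/schema_validator.py | state_schema_validator
-- ===== SOURCE A (Python) =====
-- def state_schema_validator(data_struct, state_struct):
--     unmatched = []
--
--     def validator(each_state_struct):
--         unmatched_record = []
--         visited = []
--
--         def visited_node(each_value):
--             if each_value not in visited:
--                 visited.append(each_value)
--             if each_value in each_state_struct:
--                 list_val = each_state_struct[each_value]
--                 if len(list_val) > 0:
--                     for each_list_value in list_val:
--                         visited_node(each_list_value)
--
--         for each_value in each_state_struct:
--             if each_value not in visited:
--                 if each_value not in data_struct.keys():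
--                     unmatched_record.append({"key not found": each_value})
--                     visited_node(each_value)
--                 else:
--                     child_value = each_state_struct[each_value]
--                     for each_child_value in child_value:
--                         if each_child_value not in visited:
--                             if each_child_value not in data_struct[each_value]:
--                                 unmatched_record.append(
--                                     {"value not found for the key>> " + each_value: each_child_value})
--                                 visited_node(each_child_value)
--
--         return unmatched_record
--
--     for each_list in state_struct:
--         for key, value in each_list.items():
--             mismatch = validator(value)
--             unmatched.append({key: mismatch})
--
--     return unmatched
-- ===== SOURCE B (Python) =====
-- def state_schema_validator(data_struct, state_struct):
--     def validator(schema):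
--         record = []
--         visited = []
--
--         def mark(start):
--             # iterative DFS with an explicit stack (unconditional descent, like A's recursion)
--             stack = [start]
--             while stack:
--                 node = stack.pop()
--                 if node not in visited:
--                     visited.append(node)
--                 if node in schema:
--                     stack.extend(reversed(schema[node]))
--
--         for key in schema:
--             if key in visited:
--                 continue
--             if key not in data_struct:
--                 record.append({"key not found": key})
--                 mark(key)
--             else:
--                 allowed = data_struct[key]
--                 for child in schema[key]:
--                     if child not in visited and child not in allowed:
--                         record.append({"value not found for the key>> " + key: child})
--                         mark(child)
--         return record
--
--     return [{name: validator(schema)}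
--             for group in state_struct
--             for name, schema in group.items()]
-- ===== Notes on version B (the rewrite author's own statement) =====
-- stated objective: alternative
-- what changed: A's unconditional recursive marking (visited_node) is replaced by an iterative depth-first traversal over an explicit LIFO stack with the same unguarded descent, the per-schema loops are restructured as a skip-with-continue single pass, and the result is assembled by a comprehension instead of nested appends.
-- outside the precondition, e.g. on state_schema_validator({'c': ['c']}, [{'s': {'c': ['c']}}]): A returns [{'s': []}], B returns [{'s': []}]
import Mathlib
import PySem

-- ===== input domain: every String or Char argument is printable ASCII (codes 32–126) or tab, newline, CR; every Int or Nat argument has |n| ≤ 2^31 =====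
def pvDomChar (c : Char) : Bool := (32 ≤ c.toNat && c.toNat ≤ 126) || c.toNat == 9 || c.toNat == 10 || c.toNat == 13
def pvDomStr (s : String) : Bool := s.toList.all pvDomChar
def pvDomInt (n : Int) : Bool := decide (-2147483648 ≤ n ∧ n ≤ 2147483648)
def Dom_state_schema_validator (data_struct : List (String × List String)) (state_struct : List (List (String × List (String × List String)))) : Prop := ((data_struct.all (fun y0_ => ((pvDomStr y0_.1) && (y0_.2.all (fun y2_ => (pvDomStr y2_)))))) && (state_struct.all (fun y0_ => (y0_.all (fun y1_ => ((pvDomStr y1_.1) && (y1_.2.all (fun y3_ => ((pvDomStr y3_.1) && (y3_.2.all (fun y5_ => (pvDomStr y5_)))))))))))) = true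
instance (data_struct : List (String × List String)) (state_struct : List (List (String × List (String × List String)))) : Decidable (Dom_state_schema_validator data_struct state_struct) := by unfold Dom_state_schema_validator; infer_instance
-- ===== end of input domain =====

-- B replaces A's unconditional recursive marking with an explicit-stack iterative marking
-- (same unguarded descent), restructures the per-schema loops, and builds the result by a
-- comprehension instead of nested appends; objective: alternative decomposition, same values.


-- Fuel bound shared by both ports' marking traversals (Python has neither bound: A recurses,
-- B loops; on the acyclic inputs Pre_ admits, both terminate and the bound is never reached).
def pvMarkFuel (schema : PySem.Dict String (List String)) : Nat :=
  (schema.items.foldl (fun a p => a + 1 + p.2.length) 2) ^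
    ((schema.items.foldl (fun a p => a + 1 + p.2.length) 2) + 2)

theorem pvLexMin {a n b c : Nat} (h : b < c) : Prod.Lex (· < ·) (· < ·) (min a n, b) (n, c) := by
  rcases Nat.lt_or_ge (min a n) n with h' | h'
  · exact Prod.Lex.left _ _ h'
  · have hm : min a n = n := by omega
    rw [hm]; exact Prod.Lex.right _ h

-- ===== PORT A =====
-- `visited_node`: unconditional recursive descent, threading the visited list and the fuel
-- (one unit per call; `min` in aVisitList is only a termination guard — fuel never grows).
mutual
def aVisitNode (ess : PySem.Dict String (List String)) : Nat → List String → String → Nat × List String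
  | 0, visited, _ => (0, visited)
  | n+1, visited, v =>
    let visited := if visited.contains v then visited else visited ++ [v]
    match ess.get? v with
    | some listVal =>
        if 0 < listVal.length then aVisitList ess n visited listVal else (n, visited)
    | none => (n, visited)
  termination_by n _ _ => (n, 0)
  decreasing_by
    simp_wf
    exact Prod.Lex.left _ _ (Nat.lt_succ_self n)
def aVisitList (ess : PySem.Dict String (List String)) : Nat → List String → List String → Nat × List String
  | n, visited, [] => (n, visited)
  | n, visited, c :: cs =>
    let p := aVisitNode ess n visited c
    aVisitList ess (min p.1 n) p.2 cs
  termination_by n _ cs => (n, cs.length + 1)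
  decreasing_by
    · simp_wf
      exact Prod.Lex.right _ (by omega)
    · simp_wf
      exact pvLexMin (by omega)
end

-- the inner function `validator`: fold over the schema's keys threading (record, visited)
def aValidator (ds ess : PySem.Dict String (List String)) : List (List (String × String)) :=
  (ess.keys.foldl
    (fun (st : List (List (String × String)) × List String) k =>
      if st.2.contains k then st
      else if !ds.contains k then
        (st.1 ++ [[("key not found", k)]], (aVisitNode ess (pvMarkFuel ess) st.2 k).2)
      else
        (ess.getD k []).foldl
          (fun st c =>
            if st.2.contains c then st
            else if !(ds.getD k []).contains c then
              (st.1 ++ [[("value not found for the key>> " ++ k, c)]],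
               (aVisitNode ess (pvMarkFuel ess) st.2 c).2)
            else st)
          st)
    ([], [])).1

def state_schema_validator (data_struct : List (String × List String)) (state_struct : List (List (String × List (String × List String)))) : List (List (String × List (List (String × String)))) :=
  state_struct.foldl
    (fun unmatched eachList =>
      (PySem.Dict.mk eachList).items.foldl
        (fun unmatched kv =>
          unmatched ++ [[(kv.1, aValidator (PySem.Dict.mk data_struct) (PySem.Dict.mk kv.2))]])
        unmatched)
    []

-- ===== PORT B =====
-- `mark`: iterative DFS with an explicit stack.  The list's head is the top of the stack:
-- Python pops from the end of the list and `stack.extend(reversed(l))` makes the elements of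
-- l the next pops in order, i.e. the new stack is `l ++ stack` in this representation.
def bMarkLoop (schema : PySem.Dict String (List String)) : Nat → List String → List String → List String
  | 0, visited, _ => visited
  | _+1, visited, [] => visited
  | n+1, visited, node :: stack =>
    let visited := if visited.contains node then visited else visited ++ [node]
    match schema.get? node with
    | some l => bMarkLoop schema n visited (l ++ stack)
    | none => bMarkLoop schema n visited stack

def bMark (schema : PySem.Dict String (List String)) (visited : List String) (start : String) : List String :=
  bMarkLoop schema (pvMarkFuel schema) visited [start]

-- the `for child in schema[key]` loop of B's validator
def bChildLoop (schema : PySem.Dict String (List String)) (k : String) (allowed : List String) : List String → List (List (String × String)) × List String → List (List (String × String)) × List String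
  | [], st => st
  | c :: cs, st =>
    if !st.2.contains c && !allowed.contains c then
      bChildLoop schema k allowed cs
        (st.1 ++ [[("value not found for the key>> " ++ k, c)]], bMark schema st.2 c)
    else
      bChildLoop schema k allowed cs st

-- the `for key in schema` loop of B's validator
def bKeyLoop (ds schema : PySem.Dict String (List String)) : List String → List (List (String × String)) × List String → List (List (String × String)) × List String
  | [], st => st
  | k :: ks, st =>
    if st.2.contains k then bKeyLoop ds schema ks st
    else if !ds.contains k then
      bKeyLoop ds schema ks (st.1 ++ [[("key not found", k)]], bMark schema st.2 k)
    else
      bKeyLoop ds schema ks (bChildLoop schema k (ds.getD k []) (schema.getD k []) st)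

def bValidator (ds schema : PySem.Dict String (List String)) : List (List (String × String)) :=
  (bKeyLoop ds schema schema.keys ([], [])).1

def state_schema_validator_alt (data_struct : List (String × List String)) (state_struct : List (List (String × List (String × List String)))) : List (List (String × List (List (String × String)))) :=
  state_struct.flatMap
    (fun group =>
      (PySem.Dict.mk group).items.map
        (fun p => [(p.1, bValidator (PySem.Dict.mk data_struct) (PySem.Dict.mk p.2))]))

-- ===== PRECONDITION & SPEC =====
-- one expansion step of reachability in a schema's key→children graph, iterated enough times
def pvReach (ess : List (String × List String)) (start : List String) : List String :=
  (fun S => PySem.Set.update S (S.flatMap (fun v => (PySem.Dict.mk ess).getD v []))) ^[ess.length + 1]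
    (PySem.Set.ofList start)

-- Pre_ excludes schema dicts whose key→child graph has a cycle: on such inputs A's unguarded
-- recursion can raise RecursionError (and B's unguarded stack loop can diverge); this is
-- conservative — it also excludes cyclic schemas whose cycle is never traversed, on which A returns.
def Pre_state_schema_validator (data_struct : List (String × List String)) (state_struct : List (List (String × List (String × List String)))) : Prop :=
  ∀ group ∈ state_struct, ∀ p ∈ group, ∀ q ∈ p.2,
    q.1 ∉ pvReach p.2 ((PySem.Dict.mk p.2).getD q.1 [])
instance (data_struct : List (String × List String)) (state_struct : List (List (String × List (String × List String)))) : Decidable (Pre_state_schema_validator data_struct state_struct) := by unfold Pre_state_schema_validator; infer_instance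

def pvWitness_state_schema_validator : (List (String × List String)) × (List (List (String × List (String × List String)))) :=
  ([("a", ["b"])], [[("s", [("a", ["b"]), ("c", ["d"])])]])

def Spec_state_schema_validator (data_struct : List (String × List String)) (state_struct : List (List (String × List (String × List String)))) (out : List (List (String × List (List (String × String))))) : Prop := out = state_schema_validator_alt data_struct state_struct
instance (data_struct : List (String × List String)) (state_struct : List (List (String × List (String × List String)))) (out : List (List (String × List (List (String × String))))) : Decidable (Spec_state_schema_validator data_struct state_struct out) := by unfold Spec_state_schema_validator; infer_instance

-- ===== CLAIM (what is proved, stated in full; the proofs are below) =====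
def Claim_equal_state_schema_validator : Prop := ∀ (data_struct : List (String × List String)) (state_struct : List (List (String × List (String × List String)))), Dom_state_schema_validator data_struct state_struct → Pre_state_schema_validator data_struct state_struct → Spec_state_schema_validator data_struct state_struct (state_schema_validator data_struct state_struct)

-- ===== LEMMAS AND PROOFS =====

theorem aVisitList_zero (ess : PySem.Dict String (List String)) (vis : List String) (cs : List String) : aVisitList ess 0 vis cs = (0, vis) := by
  induction cs with
  | nil => simp [aVisitList]
  | cons c cs ih => simp [aVisitList, aVisitNode, ih]

theorem aVisitList_fst_le (ess : PySem.Dict String (List String)) (cs : List String) (n : Nat) (vis : List String) : (aVisitList ess n vis cs).1 ≤ n := by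
  induction cs generalizing n vis with
  | nil => simp [aVisitList]
  | cons c cs ih =>
    calc (aVisitList ess n vis (c :: cs)).1
        = (aVisitList ess (min (aVisitNode ess n vis c).1 n) (aVisitNode ess n vis c).2 cs).1 := by
          simp [aVisitList]
      _ ≤ min (aVisitNode ess n vis c).1 n := ih _ _
      _ ≤ n := Nat.min_le_right _ _

theorem bMarkLoop_nil (ess : PySem.Dict String (List String)) (n : Nat) (vis : List String) : bMarkLoop ess n vis [] = vis := by
  cases n <;> simp [bMarkLoop]

-- the key lemma: the explicit stack loop of B processes a block `vs` of the stack exactly as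
-- A's fuel-threading recursion processes the list `vs`, and then continues with the rest
theorem bMarkLoop_eq_aVisitList (ess : PySem.Dict String (List String)) : ∀ (n : Nat) (vis vs rest : List String),
    bMarkLoop ess n vis (vs ++ rest)
      = bMarkLoop ess (aVisitList ess n vis vs).1 (aVisitList ess n vis vs).2 rest := by
  intro n
  induction n using Nat.strong_induction_on with
  | _ n ih =>
    intro vis vs rest
    match vs with
    | [] => simp [aVisitList]
    | v :: vs' =>
      match n with
      | 0 => simp [bMarkLoop, aVisitList_zero]
      | n+1 =>
        cases h : ess.get? v with
        | none =>
          have e : aVisitNode ess (n+1) vis v = (n, if vis.contains v then vis else vis ++ [v]) := by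
            rw [aVisitNode, h]
          rw [aVisitList]
          simp only [e, Nat.min_eq_left (Nat.le_succ n)]
          rw [show (v :: vs') ++ rest = v :: (vs' ++ rest) from rfl, bMarkLoop]
          simp only [h]
          exact ih n (Nat.lt_succ_self n) _ vs' rest
        | some l =>
          by_cases hl : 0 < l.length
          · have e : aVisitNode ess (n+1) vis v
                = aVisitList ess n (if vis.contains v then vis else vis ++ [v]) l := by
              rw [aVisitNode, h]; simp [hl]
            rw [aVisitList]
            simp only [e, Nat.min_eq_left (aVisitList_fst_le ess l n _ |>.trans (Nat.le_succ n))]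
            rw [show (v :: vs') ++ rest = v :: (vs' ++ rest) from rfl, bMarkLoop]
            simp only [h]
            rw [ih n (Nat.lt_succ_self n) _ l (vs' ++ rest)]
            exact ih _ (Nat.lt_succ_of_le (aVisitList_fst_le ess l n _)) _ vs' rest
          · have hl0 : l = [] := List.length_eq_zero_iff.mp (by omega)
            have e : aVisitNode ess (n+1) vis v = (n, if vis.contains v then vis else vis ++ [v]) := by
              rw [aVisitNode, h]; simp [hl]
            rw [aVisitList]
            simp only [e, Nat.min_eq_left (Nat.le_succ n)]
            rw [show (v :: vs') ++ rest = v :: (vs' ++ rest) from rfl, bMarkLoop]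
            simp only [h, hl0, List.nil_append]
            exact ih n (Nat.lt_succ_self n) _ vs' rest

theorem bMark_eq_aVisitNode (ess : PySem.Dict String (List String)) (vis : List String) (v : String) : bMark ess vis v = (aVisitNode ess (pvMarkFuel ess) vis v).2 := by
  have h := bMarkLoop_eq_aVisitList ess (pvMarkFuel ess) vis [v] []
  simp only [List.cons_append, List.nil_append] at h
  rw [bMark, h, bMarkLoop_nil]
  simp [aVisitList]

theorem bChildLoop_eq (ds ess : PySem.Dict String (List String)) (k : String) (cs : List String) (st : List (List (String × String)) × List String) :
    bChildLoop ess k (ds.getD k []) cs st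
      = cs.foldl
          (fun st c =>
            if st.2.contains c then st
            else if !(ds.getD k []).contains c then
              (st.1 ++ [[("value not found for the key>> " ++ k, c)]],
               (aVisitNode ess (pvMarkFuel ess) st.2 c).2)
            else st)
          st := by
  induction cs generalizing st with
  | nil => rfl
  | cons c cs ih =>
    rw [bChildLoop, List.foldl_cons]
    by_cases h1 : c ∈ st.2
    · simp [h1, ih]
    · by_cases h2 : c ∈ ds.getD k []
      · simp [h1, h2, ih]
      · simp [h1, h2, ih, bMark_eq_aVisitNode]

theorem bKeyLoop_eq (ds ess : PySem.Dict String (List String)) (ks : List String) (st : List (List (String × String)) × List String) :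
    bKeyLoop ds ess ks st
      = ks.foldl
          (fun st k =>
            if st.2.contains k then st
            else if !ds.contains k then
              (st.1 ++ [[("key not found", k)]], (aVisitNode ess (pvMarkFuel ess) st.2 k).2)
            else
              (ess.getD k []).foldl
                (fun st c =>
                  if st.2.contains c then st
                  else if !(ds.getD k []).contains c then
                    (st.1 ++ [[("value not found for the key>> " ++ k, c)]],
                     (aVisitNode ess (pvMarkFuel ess) st.2 c).2)
                  else st)
                st)
          st := by
  induction ks generalizing st with
  | nil => rfl
  | cons k ks ih =>
    rw [bKeyLoop, List.foldl_cons]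
    by_cases h1 : k ∈ st.2
    · simp [h1, ih]
    · by_cases h2 : ds.contains k
      · simp [h1, h2, ih, bChildLoop_eq]
      · simp [h1, h2, ih, bMark_eq_aVisitNode]

theorem validator_eq (ds ess : PySem.Dict String (List String)) : bValidator ds ess = aValidator ds ess := by
  rw [bValidator, aValidator, bKeyLoop_eq]

-- ===== VERDICT (by name: the statement is the Claim_ definition above) =====
theorem state_schema_validator_spec : Claim_equal_state_schema_validator := by
  intro data_struct state_struct _ _
  unfold Spec_state_schema_validator state_schema_validator state_schema_validator_alt
  simp only [PySem.List.foldl_append_singleton_eq_map, PySem.List.foldl_append_eq_flatMap,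
    validator_eq, List.nil_append]
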